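-- pv_equiv track=rewrite | github.com/odcampbell/TSP-Algorithms | TSP_HPrime.py | create_tour_from_spanning_tree
-- ===== SOURCE A (Python) =====
-- def create_tour_from_spanning_tree(spanning_tree, num_nodes, excluded_edges):
--     # Create an adjacency list representation of the spanning tree
--     adjacency_list = {i: [] for i in range(num_nodes)}
--     for edge in spanning_tree:
--         adjacency_list[edge[0]].append((edge[1], edge[2]))
--         adjacency_list[edge[1]].append((edge[0], edge[2]))
--
--     # Create a set of excluded edges for faster lookup
--     excluded_edges_set = set((edge[0], edge[1]) for edge in excluded_edges)
--
--     def dfs(current_node, visited):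
--         visited.add(current_node)
--         neighbors = sorted(adjacency_list[current_node], key=lambda x: x[1])
--
--         for neighbor, weight in neighbors:
--             if neighbor not in visited and (current_node, neighbor) not in excluded_edges_set:
--                 tour.append(neighbor)
--                 dfs(neighbor, visited)
--
--     start_node = 0  # You can choose any starting node
--     visited_nodes = set()
--     tour = [start_node]
--     dfs(start_node, visited_nodes)
--
--     return tour
-- ===== SOURCE B (Python) =====
-- def create_tour_from_spanning_tree(spanning_tree, num_nodes, excluded_edges):
--     # Same adjacency list and excluded-edge set as before, but the tour is
--     # produced by an explicit stack (iterative DFS) instead of recursion.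
--     adjacency_list = {i: [] for i in range(num_nodes)}
--     for edge in spanning_tree:
--         adjacency_list[edge[0]].append((edge[1], edge[2]))
--         adjacency_list[edge[1]].append((edge[0], edge[2]))
--
--     excluded_edges_set = set((edge[0], edge[1]) for edge in excluded_edges)
--
--     visited = set()
--     tour = []
--     stack = [0]  # start node
--     while stack:
--         node = stack.pop()
--         if node in visited:
--             continue
--         visited.add(node)
--         tour.append(node)
--         # push cheapest neighbor last so it is explored first
--         for neighbor, weight in reversed(sorted(adjacency_list[node], key=lambda x: x[1])):
--             if (node, neighbor) not in excluded_edges_set: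
--                 stack.append(neighbor)
--     return tour
-- ===== Notes on version B (the rewrite author's own statement) =====
-- stated objective: alternative
-- what changed: The recursive dfs with a shared mutable visited set and a global tour list is replaced by an iterative DFS: an explicit stack seeded with the start node, popping a node, skipping it if already visited, appending it to the tour and pushing its non-excluded neighbors in reverse weight-sorted order so the cheapest is explored first; this reproduces A's preorder without Python recursion.
import Mathlib
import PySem

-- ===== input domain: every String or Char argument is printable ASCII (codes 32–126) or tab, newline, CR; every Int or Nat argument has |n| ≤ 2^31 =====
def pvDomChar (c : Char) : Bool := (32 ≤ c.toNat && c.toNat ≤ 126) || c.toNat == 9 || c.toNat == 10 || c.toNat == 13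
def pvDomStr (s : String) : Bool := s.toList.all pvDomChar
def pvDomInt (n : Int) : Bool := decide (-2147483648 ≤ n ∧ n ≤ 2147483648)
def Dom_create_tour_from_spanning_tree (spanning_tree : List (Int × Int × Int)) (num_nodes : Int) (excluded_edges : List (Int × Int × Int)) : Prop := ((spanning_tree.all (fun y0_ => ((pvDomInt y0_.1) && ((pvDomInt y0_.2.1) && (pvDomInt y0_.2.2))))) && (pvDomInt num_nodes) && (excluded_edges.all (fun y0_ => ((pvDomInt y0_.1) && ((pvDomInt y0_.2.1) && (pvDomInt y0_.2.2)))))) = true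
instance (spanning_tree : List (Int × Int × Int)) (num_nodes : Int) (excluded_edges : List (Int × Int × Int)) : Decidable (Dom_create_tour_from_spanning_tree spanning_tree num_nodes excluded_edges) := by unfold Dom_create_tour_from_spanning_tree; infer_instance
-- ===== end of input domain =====

-- B replaces A's recursive dfs by an iterative DFS with an explicit stack (same tour; no speed claim).

-- ===== PORT A =====
-- helpers shared by both ports: both Pythons build the identical adjacency dict and excluded-edge set
def pvAdjList (spanning_tree : List (Int × Int × Int)) (num_nodes : Int) :
    PySem.Dict Int (List (Int × Int)) :=
  let init := (PySem.List.pyRange 0 num_nodes 1).foldl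
    (fun d i => d.insert i []) PySem.Dict.empty
  spanning_tree.foldl (fun d e =>
    (d.modify e.1 [] (fun l => l ++ [(e.2.1, e.2.2)])).modify e.2.1 []
      (fun l => l ++ [(e.1, e.2.2)])) init

def pvExclSet (excluded_edges : List (Int × Int × Int)) : PySem.Set (Int × Int) :=
  PySem.Set.ofList (excluded_edges.map (fun e => (e.1, e.2.1)))

-- sorted(adjacency_list[cur], key=lambda x: x[1])
def pvNbrs (adj : PySem.Dict Int (List (Int × Int))) (cur : Int) : List (Int × Int) :=
  PySem.List.sorted (adj.getD cur []) (fun x => x.2) false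

-- literal port of A's recursive dfs, fueled to make it total; fuel 2*|tree|+2 exceeds
-- the recursion depth (shown sufficient in the proofs below)
def pvDfsA (adj : PySem.Dict Int (List (Int × Int))) (excl : PySem.Set (Int × Int)) :
    Nat → Int → PySem.Set Int × List Int → PySem.Set Int × List Int
  | 0, _, st => st
  | f+1, cur, (v, t) =>
    let v' := PySem.Set.add v cur
    (pvNbrs adj cur).foldl
      (fun st nw =>
        if !(PySem.Set.contains st.1 nw.1) && !(PySem.Set.contains excl (cur, nw.1)) then
          pvDfsA adj excl f nw.1 (st.1, st.2 ++ [nw.1])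
        else st) (v', t)

def create_tour_from_spanning_tree (spanning_tree : List (Int × Int × Int)) (num_nodes : Int) (excluded_edges : List (Int × Int × Int)) : List Int :=
  let adj := pvAdjList spanning_tree num_nodes
  let excl := pvExclSet excluded_edges
  let start : Int := 0
  (pvDfsA adj excl (2 * spanning_tree.length + 2) start (PySem.Set.empty, [start])).2

-- ===== PORT B =====
-- the push loop: for nb,w in reversed(sorted(...)): if (node,nb) not in excl: stack.append(nb)
-- (stack is modelled with its top at the head, so Python's append is a cons)
def pvPush (adj : PySem.Dict Int (List (Int × Int))) (excl : PySem.Set (Int × Int))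
    (node : Int) (stack : List Int) : List Int :=
  (pvNbrs adj node).reverse.foldl
    (fun s nw => if !(PySem.Set.contains excl (node, nw.1)) then nw.1 :: s else s) stack

-- pushed entries, in pop order (used by pvRunB's termination proof and by the equivalence)
theorem pvFoldCons (p : (Int × Int) → Bool) :
    ∀ (l : List (Int × Int)) (s : List Int),
      l.foldl (fun s nw => if p nw then nw.1 :: s else s) s = ((l.filter p).reverse).map (fun nw => nw.1) ++ s := by
  intro l
  induction l with
  | nil => intro s; simp
  | cons x xs ih =>
    intro s
    by_cases hx : p x <;> simp [List.foldl_cons, hx, ih]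

theorem pvPush_eq (adj : PySem.Dict Int (List (Int × Int))) (excl : PySem.Set (Int × Int))
    (node : Int) (stack : List Int) :
    pvPush adj excl node stack =
      ((pvNbrs adj node).filter (fun nw => !(PySem.Set.contains excl (node, nw.1)))).map
        (fun nw => nw.1) ++ stack := by
  unfold pvPush
  rw [pvFoldCons]
  simp [List.filter_reverse]

-- termination measure for the while loop: stack size plus, for each not-yet-visited
-- adjacency key, its number of pushable neighbors plus one
def pvMu (adj : PySem.Dict Int (List (Int × Int))) (excl : PySem.Set (Int × Int))
    (v : PySem.Set Int) (stack : List Int) : Nat :=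
  stack.length +
    (((PySem.Dict.keys adj).dedup.filter (fun n => !(PySem.Set.contains v n))).map
      (fun n => ((pvNbrs adj n).filter (fun nw => !(PySem.Set.contains excl (n, nw.1)))).length + 1)).sum

theorem pvContains_add (v : PySem.Set Int) (node n : Int) :
    PySem.Set.contains (PySem.Set.add v node) n = (PySem.Set.contains v n || n == node) := by
  rw [Bool.eq_iff_iff]
  simp [PySem.Set.mem_add]

theorem pvMu_dec (adj : PySem.Dict Int (List (Int × Int))) (excl : PySem.Set (Int × Int))
    (v : PySem.Set Int) (node : Int) (s : List Int)
    (h : ¬ PySem.Set.contains v node = true) :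
    pvMu adj excl (PySem.Set.add v node) (pvPush adj excl node s) < pvMu adj excl v (node :: s) := by
  have hfalse : PySem.Set.contains v node = false := by simpa using h
  unfold pvMu
  rw [pvPush_eq]
  set K := (PySem.Dict.keys adj).dedup with hK
  have hnd : K.Nodup := List.nodup_dedup _
  set f : Int → Nat := fun n => ((pvNbrs adj n).filter (fun nw => !(PySem.Set.contains excl (n, nw.1)))).length + 1 with hf
  set L : Nat := ((pvNbrs adj node).filter (fun nw => !(PySem.Set.contains excl (node, nw.1)))).length with hL
  have hsplit : K.filter (fun n => !(PySem.Set.contains (PySem.Set.add v node) n))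
      = (K.filter (fun n => !(PySem.Set.contains v n))).filter (fun n => !(n == node)) := by
    rw [List.filter_filter]
    apply List.filter_congr
    intro n _
    rw [pvContains_add]
    cases PySem.Set.contains v n <;> cases hb : (n == node) <;> simp
  by_cases hmem : node ∈ K
  · -- node is an adjacency key: the sum loses exactly f node = L + 1
    have hmemf : node ∈ K.filter (fun n => !(PySem.Set.contains v n)) := by
      have hnotmem : node ∉ v := fun hmv => by
        have hc := (PySem.Set.contains_iff v node).mpr hmv
        rw [hfalse] at hc; cases hc
      rw [List.mem_filter]
      refine ⟨hmem, ?_⟩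
      simp [hnotmem]
    have hndf : (K.filter (fun n => !(PySem.Set.contains v n))).Nodup := hnd.filter _
    have herase : (K.filter (fun n => !(PySem.Set.contains v n))).filter (fun n => !(n == node))
        = (K.filter (fun n => !(PySem.Set.contains v n))).erase node := by
      rw [hndf.erase_eq_filter]
      apply List.filter_congr; intro n _; simp [bne]
    have hperm : (K.filter (fun n => !(PySem.Set.contains v n))).Perm
        (node :: (K.filter (fun n => !(PySem.Set.contains v n))).erase node) :=
      List.perm_cons_erase hmemf
    have hsum : ((K.filter (fun n => !(PySem.Set.contains v n))).map f).sum
        = f node + (((K.filter (fun n => !(PySem.Set.contains v n))).erase node).map f).sum := by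
      rw [(hperm.map f).sum_eq]
      simp
    rw [hsplit, herase]
    simp only [List.length_append, List.length_map, List.length_cons]
    rw [hsum]
    simp only [hf]
    omega
  · -- node is not an adjacency key: it has no neighbors, so nothing is pushed
    have hnb : pvNbrs adj node = [] := by
      have hnk : node ∉ PySem.Dict.keys adj := fun hc => hmem (List.mem_dedup.mpr hc)
      have hcont : PySem.Dict.contains adj node = false := by
        rcases Bool.eq_false_or_eq_true (PySem.Dict.contains adj node) with h' | h'
        · exact absurd ((PySem.Dict.contains_iff_mem_keys adj node).mp h') hnk
        · exact h'
      unfold pvNbrs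
      rw [PySem.Dict.getD_of_not_contains adj [] hcont]
      rfl
    have hLe : ((K.filter (fun n => !(PySem.Set.contains (PySem.Set.add v node) n))).map f).sum
        ≤ ((K.filter (fun n => !(PySem.Set.contains v n))).map f).sum := by
      apply List.Sublist.sum_le_sum
      · apply List.Sublist.map
        rw [hsplit]
        exact List.filter_sublist
      · intro a _; exact Nat.zero_le a
    simp only [List.length_append, List.length_map, List.length_cons, hnb, List.filter_nil,
      List.length_nil] at *
    omega

-- the while loop of B
def pvRunB (adj : PySem.Dict Int (List (Int × Int))) (excl : PySem.Set (Int × Int)) :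
    PySem.Set Int → List Int → List Int → List Int
  | _, t, [] => t
  | v, t, node :: s =>
    if h : PySem.Set.contains v node then pvRunB adj excl v t s
    else pvRunB adj excl (PySem.Set.add v node) (t ++ [node]) (pvPush adj excl node s)
termination_by v _ stack => pvMu adj excl v stack
decreasing_by
  · simp [pvMu]
  · exact pvMu_dec adj excl v node s h

def create_tour_from_spanning_tree_alt (spanning_tree : List (Int × Int × Int)) (num_nodes : Int) (excluded_edges : List (Int × Int × Int)) : List Int :=
  let adj := pvAdjList spanning_tree num_nodes
  let excl := pvExclSet excluded_edges
  pvRunB adj excl PySem.Set.empty [] [0]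

-- ===== PRECONDITION & SPEC =====
-- Python A raises KeyError unless the start node 0 exists (num_nodes ≥ 1) and every
-- spanning-tree endpoint is a key of the adjacency dict, i.e. lies in range(num_nodes).
def Pre_create_tour_from_spanning_tree (spanning_tree : List (Int × Int × Int)) (num_nodes : Int) (excluded_edges : List (Int × Int × Int)) : Prop :=
  1 ≤ num_nodes ∧ ∀ e ∈ spanning_tree, 0 ≤ e.1 ∧ e.1 < num_nodes ∧ 0 ≤ e.2.1 ∧ e.2.1 < num_nodes
instance (spanning_tree : List (Int × Int × Int)) (num_nodes : Int) (excluded_edges : List (Int × Int × Int)) : Decidable (Pre_create_tour_from_spanning_tree spanning_tree num_nodes excluded_edges) := by unfold Pre_create_tour_from_spanning_tree; infer_instance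

def pvWitness_create_tour_from_spanning_tree : (List (Int × Int × Int)) × Int × (List (Int × Int × Int)) :=
  ([(0, 1, 5), (1, 2, 3)], 3, [(2, 1, 3)])

def Spec_create_tour_from_spanning_tree (spanning_tree : List (Int × Int × Int)) (num_nodes : Int) (excluded_edges : List (Int × Int × Int)) (out : List Int) : Prop := out = create_tour_from_spanning_tree_alt spanning_tree num_nodes excluded_edges
instance (spanning_tree : List (Int × Int × Int)) (num_nodes : Int) (excluded_edges : List (Int × Int × Int)) (out : List Int) : Decidable (Spec_create_tour_from_spanning_tree spanning_tree num_nodes excluded_edges out) := by unfold Spec_create_tour_from_spanning_tree; infer_instance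

-- ===== CLAIM (what is proved, stated in full; the proofs are below) =====
def Claim_equal_create_tour_from_spanning_tree : Prop := ∀ (spanning_tree : List (Int × Int × Int)) (num_nodes : Int) (excluded_edges : List (Int × Int × Int)), Dom_create_tour_from_spanning_tree spanning_tree num_nodes excluded_edges → Pre_create_tour_from_spanning_tree spanning_tree num_nodes excluded_edges → Spec_create_tour_from_spanning_tree spanning_tree num_nodes excluded_edges (create_tour_from_spanning_tree spanning_tree num_nodes excluded_edges)

-- ===== LEMMAS AND PROOFS =====

-- visited only grows through A's dfs
theorem pvDfsA_mono (adj : PySem.Dict Int (List (Int × Int))) (excl : PySem.Set (Int × Int)) :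
    ∀ (f : Nat) (cur : Int) (v : PySem.Set Int) (t : List Int) (x : Int),
      x ∈ v → x ∈ (pvDfsA adj excl f cur (v, t)).1 := by
  intro f
  induction f with
  | zero => intro cur v t x hx; simpa [pvDfsA] using hx
  | succ f ih =>
    intro cur v t x hx
    simp only [pvDfsA]
    have hgen : ∀ (ns : List (Int × Int)) (st : PySem.Set Int × List Int), x ∈ st.1 →
        x ∈ (ns.foldl (fun st nw =>
          if !(PySem.Set.contains st.1 nw.1) && !(PySem.Set.contains excl (cur, nw.1)) then
            pvDfsA adj excl f nw.1 (st.1, st.2 ++ [nw.1])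
          else st) st).1 := by
      intro ns
      induction ns with
      | nil => intro st hst; exact hst
      | cons nw ns ihn =>
        intro st hst
        simp only [List.foldl_cons]
        by_cases hc : (!(PySem.Set.contains st.1 nw.1) && !(PySem.Set.contains excl (cur, nw.1))) = true
        · rw [if_pos hc]; exact ihn _ (ih nw.1 st.1 (st.2 ++ [nw.1]) x hst)
        · rw [if_neg hc]; exact ihn _ hst
    exact hgen _ _ ((PySem.Set.mem_add _ _ _).mpr (Or.inl hx))

-- residual count of a universe list: the not-yet-visited entries of UL.dedup
def pvResid (UL : List Int) (v : PySem.Set Int) : Nat :=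
  (UL.dedup.filter (fun n => !(PySem.Set.contains v n))).length

theorem pvResid_antitone (UL : List Int) (v w : PySem.Set Int)
    (hsub : ∀ x, x ∈ v → x ∈ w) : pvResid UL w ≤ pvResid UL v := by
  unfold pvResid
  apply List.Sublist.length_le
  apply List.monotone_filter_right
  intro n hn
  simp only [Bool.not_eq_eq_eq_not, Bool.not_true] at hn ⊢
  rcases Bool.eq_false_or_eq_true (PySem.Set.contains v n) with h' | h'
  · have := hsub n ((PySem.Set.contains_iff v n).mp h')
    rw [(PySem.Set.contains_iff w n).mpr this] at hn
    cases hn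
  · exact h'

theorem pvResid_strict (UL : List Int) (v : PySem.Set Int) (cur : Int)
    (hmem : cur ∈ UL) (h : PySem.Set.contains v cur = false) :
    pvResid UL (PySem.Set.add v cur) < pvResid UL v := by
  unfold pvResid
  have hsplit : UL.dedup.filter (fun n => !(PySem.Set.contains (PySem.Set.add v cur) n))
      = (UL.dedup.filter (fun n => !(PySem.Set.contains v n))).filter (fun n => !(n == cur)) := by
    rw [List.filter_filter]
    apply List.filter_congr
    intro n _
    rw [pvContains_add]
    cases PySem.Set.contains v n <;> cases hb : (n == cur) <;> simp
  have hmemf : cur ∈ UL.dedup.filter (fun n => !(PySem.Set.contains v n)) := by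
    rw [List.mem_filter]
    have hnm : cur ∉ v := fun hmv => by
      have hc := (PySem.Set.contains_iff v cur).mpr hmv
      rw [h] at hc; cases hc
    exact ⟨List.mem_dedup.mpr hmem, by simp [hnm]⟩
  have hsub : List.Sublist
      ((UL.dedup.filter (fun n => !(PySem.Set.contains v n))).filter (fun n => !(n == cur)))
      (UL.dedup.filter (fun n => !(PySem.Set.contains v n))) := List.filter_sublist
  rw [hsplit]
  refine Nat.lt_of_le_of_ne hsub.length_le (fun heq => ?_)
  have heq2 := hsub.eq_of_length heq
  rw [← heq2] at hmemf
  rcases List.mem_filter.mp hmemf with ⟨_, hpc⟩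
  simp at hpc

-- every neighbor stored in the adjacency dict is an endpoint of some spanning-tree edge
theorem pvAdj_vals (Q : Int → Prop) :
    ∀ (l : List (Int × Int × Int)) (d : PySem.Dict Int (List (Int × Int))),
      (∀ k nw, nw ∈ d.getD k [] → Q nw.1) → (∀ e ∈ l, Q e.1 ∧ Q e.2.1) →
      ∀ k nw, nw ∈ ((l.foldl (fun d e =>
        (d.modify e.1 [] (fun l => l ++ [(e.2.1, e.2.2)])).modify e.2.1 []
          (fun l => l ++ [(e.1, e.2.2)])) d).getD k []) → Q nw.1 := by
  intro l
  induction l with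
  | nil => intro d hd _ k nw hmem; exact hd k nw hmem
  | cons e l ih =>
    intro d hd hl k nw hmem
    rw [List.foldl_cons] at hmem
    refine ih _ ?_ (fun e' he' => hl e' (List.mem_cons_of_mem _ he')) k nw hmem
    have hQ1 : Q e.1 := (hl e (List.mem_cons_self)).1
    have hQ2 : Q e.2.1 := (hl e (List.mem_cons_self)).2
    intro k' nw' h'
    rw [PySem.Dict.getD_modify] at h'
    by_cases h21 : k' = e.2.1
    · rw [if_pos h21] at h'
      rcases List.mem_append.mp h' with hin | hone
      · rw [PySem.Dict.getD_modify] at hin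
        by_cases h1 : e.2.1 = e.1
        · rw [if_pos h1] at hin
          rcases List.mem_append.mp hin with hin2 | hone2
          · exact hd _ _ hin2
          · rw [List.mem_singleton.mp hone2]; exact hQ2
        · rw [if_neg h1] at hin; exact hd _ _ hin
      · rw [List.mem_singleton.mp hone]; exact hQ1
    · rw [if_neg h21] at h'
      rw [PySem.Dict.getD_modify] at h'
      by_cases h1 : k' = e.1
      · rw [if_pos h1] at h'
        rcases List.mem_append.mp h' with hin | hone
        · exact hd _ _ hin
        · rw [List.mem_singleton.mp hone]; exact hQ2
      · rw [if_neg h1] at h'; exact hd _ _ h'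

theorem pvInit_getD (l : List Int) (k : Int) :
    ((l.foldl (fun d i => d.insert i ([] : List (Int × Int))) PySem.Dict.empty).getD k []) = [] := by
  have hgen : ∀ (l : List Int) (d : PySem.Dict Int (List (Int × Int))),
      (∀ k, d.getD k [] = []) → ∀ k, ((l.foldl (fun d i => d.insert i []) d).getD k []) = [] := by
    intro l
    induction l with
    | nil => intro d hd k; exact hd k
    | cons i l ih =>
      intro d hd k
      rw [List.foldl_cons]
      refine ih _ (fun k' => ?_) k
      rw [PySem.Dict.getD_insert]
      split_ifs with h
      · rfl
      · exact hd k'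
  exact hgen l PySem.Dict.empty (fun k => PySem.Dict.getD_empty k []) k

-- unfolding equations for the two loops
theorem pvRunB_nil (adj : PySem.Dict Int (List (Int × Int))) (excl : PySem.Set (Int × Int))
    (v : PySem.Set Int) (t : List Int) : pvRunB adj excl v t [] = t := by
  simp [pvRunB]

theorem pvRunB_cons_visited (adj : PySem.Dict Int (List (Int × Int))) (excl : PySem.Set (Int × Int))
    (v : PySem.Set Int) (t : List Int) (node : Int) (s : List Int)
    (h : PySem.Set.contains v node = true) :
    pvRunB adj excl v t (node :: s) = pvRunB adj excl v t s := by
  rw [pvRunB, dif_pos h]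

theorem pvRunB_cons_new (adj : PySem.Dict Int (List (Int × Int))) (excl : PySem.Set (Int × Int))
    (v : PySem.Set Int) (t : List Int) (node : Int) (s : List Int)
    (h : PySem.Set.contains v node = false) :
    pvRunB adj excl v t (node :: s) =
      pvRunB adj excl (PySem.Set.add v node) (t ++ [node]) (pvPush adj excl node s) := by
  rw [pvRunB, dif_neg (by rw [h]; simp)]

theorem pvDfsA_succ (adj : PySem.Dict Int (List (Int × Int))) (excl : PySem.Set (Int × Int))
    (f : Nat) (cur : Int) (v : PySem.Set Int) (t : List Int) :
    pvDfsA adj excl (f+1) cur (v, t) =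
      (pvNbrs adj cur).foldl
        (fun st nw =>
          if !(PySem.Set.contains st.1 nw.1) && !(PySem.Set.contains excl (cur, nw.1)) then
            pvDfsA adj excl f nw.1 (st.1, st.2 ++ [nw.1])
          else st) (PySem.Set.add v cur, t) := rfl

-- the bridge: popping an unvisited node and running the stack machine is running A's dfs
-- from that node and then the rest of the stack
theorem pvBridge (adj : PySem.Dict Int (List (Int × Int))) (excl : PySem.Set (Int × Int))
    (UL : List Int) (hvals : ∀ k nw, nw ∈ adj.getD k [] → nw.1 ∈ UL) :
    ∀ (f : Nat) (v : PySem.Set Int) (t : List Int) (cur : Int) (S : List Int),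
      cur ∈ UL → PySem.Set.contains v cur = false → pvResid UL v < f →
      pvRunB adj excl v t (cur :: S) =
        pvRunB adj excl (pvDfsA adj excl f cur (v, t ++ [cur])).1
          (pvDfsA adj excl f cur (v, t ++ [cur])).2 S := by
  intro f
  induction f with
  | zero => intro v t cur S _ _ hres; exact absurd hres (Nat.not_lt_zero _)
  | succ f ih =>
    intro v t cur S hcurU hcurv hres
    rw [pvRunB_cons_new adj excl v t cur S hcurv, pvPush_eq, pvDfsA_succ]
    have hns : ∀ nw ∈ pvNbrs adj cur, nw.1 ∈ UL := fun nw hnw =>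
      hvals cur nw ((PySem.List.mem_sorted _ _ _ _).mp hnw)
    have hresv : pvResid UL (PySem.Set.add v cur) < f := by
      have := pvResid_strict UL v cur hcurU hcurv
      omega
    have inner : ∀ (ns : List (Int × Int)) (v' : PySem.Set Int) (t' S' : List Int),
        (∀ nw ∈ ns, nw.1 ∈ UL) → pvResid UL v' < f →
        pvRunB adj excl v' t'
            ((ns.filter (fun nw => !(PySem.Set.contains excl (cur, nw.1)))).map (fun nw => nw.1) ++ S')
          = pvRunB adj excl
              (ns.foldl (fun st nw =>
                if !(PySem.Set.contains st.1 nw.1) && !(PySem.Set.contains excl (cur, nw.1)) then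
                  pvDfsA adj excl f nw.1 (st.1, st.2 ++ [nw.1])
                else st) (v', t')).1
              (ns.foldl (fun st nw =>
                if !(PySem.Set.contains st.1 nw.1) && !(PySem.Set.contains excl (cur, nw.1)) then
                  pvDfsA adj excl f nw.1 (st.1, st.2 ++ [nw.1])
                else st) (v', t')).2 S' := by
      intro ns
      induction ns with
      | nil => intro v' t' S' _ _; simp
      | cons nw ns ihn =>
        intro v' t' S' hmemU hres'
        simp only [List.foldl_cons, List.filter_cons]
        by_cases hok : PySem.Set.contains excl (cur, nw.1) = true
        · simp only [hok, Bool.not_true, Bool.and_false, Bool.false_eq_true, if_false]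
          exact ihn v' t' S' (fun x hx => hmemU x (List.mem_cons_of_mem _ hx)) hres'
        · have hok' : PySem.Set.contains excl (cur, nw.1) = false := by
            rcases Bool.eq_false_or_eq_true (PySem.Set.contains excl (cur, nw.1)) with h' | h'
            · exact absurd h' hok
            · exact h'
          by_cases hv : PySem.Set.contains v' nw.1 = true
          · simp only [hok', hv, Bool.not_true, Bool.not_false,
              Bool.and_true, if_true, if_false, Bool.false_eq_true, List.map_cons]
            rw [List.cons_append, pvRunB_cons_visited adj excl v' t' nw.1 _ hv]
            exact ihn v' t' S' (fun x hx => hmemU x (List.mem_cons_of_mem _ hx)) hres'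
          · have hv' : PySem.Set.contains v' nw.1 = false := by
              rcases Bool.eq_false_or_eq_true (PySem.Set.contains v' nw.1) with h' | h'
              · exact absurd h' hv
              · exact h'
            simp only [hok', hv', Bool.not_false, Bool.and_true, if_true,
              List.map_cons]
            rw [List.cons_append,
              ih v' t' nw.1 ((ns.filter (fun nw => !(PySem.Set.contains excl (cur, nw.1)))).map (fun nw => nw.1) ++ S')
                (hmemU nw List.mem_cons_self) hv' hres']
            have hmono : ∀ x, x ∈ v' → x ∈ (pvDfsA adj excl f nw.1 (v', t' ++ [nw.1])).1 :=
              fun x hx => pvDfsA_mono adj excl f nw.1 v' (t' ++ [nw.1]) x hx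
            have hres2 : pvResid UL (pvDfsA adj excl f nw.1 (v', t' ++ [nw.1])).1 < f :=
              lt_of_le_of_lt (pvResid_antitone UL v' _ hmono) hres'
            have := ihn (pvDfsA adj excl f nw.1 (v', t' ++ [nw.1])).1
              (pvDfsA adj excl f nw.1 (v', t' ++ [nw.1])).2 S'
              (fun x hx => hmemU x (List.mem_cons_of_mem _ hx)) hres2
            rw [this]
    exact inner (pvNbrs adj cur) (PySem.Set.add v cur) (t ++ [cur]) S hns hresv

-- ===== VERDICT (by name: the statement is the Claim_ definition above) =====
theorem create_tour_from_spanning_tree_spec : Claim_equal_create_tour_from_spanning_tree := by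
  unfold Claim_equal_create_tour_from_spanning_tree
  intro st nn ex _hdom _hpre
  unfold Spec_create_tour_from_spanning_tree
  unfold create_tour_from_spanning_tree create_tour_from_spanning_tree_alt
  simp only []
  have hflat : ∀ (l : List (Int × Int × Int)),
      (l.flatMap (fun e => [e.1, e.2.1])).length = 2 * l.length := by
    intro l
    induction l with
    | nil => rfl
    | cons e l ih =>
      rw [List.flatMap_cons, List.length_append, ih, List.length_cons]
      simp
      omega
  have hvals : ∀ k nw, nw ∈ (pvAdjList st nn).getD k [] →
      nw.1 ∈ (0 :: st.flatMap (fun e => [e.1, e.2.1])) := by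
    intro k nw h
    unfold pvAdjList at h
    simp only [] at h
    refine pvAdj_vals (fun x => x ∈ (0 :: st.flatMap (fun e => [e.1, e.2.1]))) st _ ?_ ?_ k nw h
    · intro k' nw' h'
      rw [pvInit_getD] at h'
      cases h'
    · intro e he
      exact ⟨List.mem_cons_of_mem _ (List.mem_flatMap.mpr ⟨e, he, by simp⟩),
        List.mem_cons_of_mem _ (List.mem_flatMap.mpr ⟨e, he, by simp⟩)⟩
  have hres : pvResid (0 :: st.flatMap (fun e => [e.1, e.2.1])) PySem.Set.empty
      < 2 * st.length + 2 := by
    unfold pvResid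
    have h1 : ((0 :: st.flatMap (fun e => [e.1, e.2.1])).dedup.filter
        (fun n => !(PySem.Set.contains PySem.Set.empty n))).length
        ≤ (0 :: st.flatMap (fun e => [e.1, e.2.1])).dedup.length :=
      (List.filter_sublist).length_le
    have h2 : (0 :: st.flatMap (fun e => [e.1, e.2.1])).dedup.length
        ≤ (0 :: st.flatMap (fun e => [e.1, e.2.1])).length :=
      (List.dedup_sublist _).length_le
    simp only [List.length_cons, hflat st] at h2
    omega
  have hb := pvBridge (pvAdjList st nn) (pvExclSet ex) (0 :: st.flatMap (fun e => [e.1, e.2.1]))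
    hvals (2 * st.length + 2) PySem.Set.empty [] 0 [] List.mem_cons_self rfl hres
  rw [pvRunB_nil] at hb
  simp only [List.nil_append] at hb
  exact hb.symm
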